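-- pv_equiv track=rewrite | github.com/MrBrantCode/unitest_baseline | mut_generate/mist_train_cf/cf_69195/solution.py | consonant_count_and_common
-- ===== SOURCE A (Python) =====
-- from typing import Tuple
-- from collections import Counter
--
-- def consonant_count_and_common(s: str) -> Tuple[int, str]:
--     s = s.lower()
--     consonants = "bcdfghjklmnpqrstvwxyz"
--     counter = Counter(s)
--     consonant_count = sum(counter[c] for c in consonants if c in counter)
--
--     common_consonants = [(c, counter[c]) for c in consonants if c in counter]
--     common_consonants.sort(key=lambda x: (-x[1], x[0]))
--     most_common = common_consonants[0][0] if common_consonants else None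
--
--     return (consonant_count, most_common)
-- ===== SOURCE B (Python) =====
-- def consonant_count_and_common(s):
--     consonants = set("bcdfghjklmnpqrstvwxyz")
--     total = 0
--     counts = {}
--     for ch in s.lower():
--         if ch in consonants:
--             total += 1
--             counts[ch] = counts.get(ch, 0) + 1
--     if not counts:
--         return (total, None)
--     best = min(counts, key=lambda c: (-counts[c], c))
--     return (total, best)
-- ===== Notes on version B (the rewrite author's own statement) =====
-- stated objective: simpler
-- what changed: B makes a single pass over s.lower() keeping a running total and a per-consonant count dict, then picks the winner with one argmin (key (-count, letter)), instead of A's whole-string Counter, alphabet scan with sum, pair-list build and full sort.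
import Mathlib
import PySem

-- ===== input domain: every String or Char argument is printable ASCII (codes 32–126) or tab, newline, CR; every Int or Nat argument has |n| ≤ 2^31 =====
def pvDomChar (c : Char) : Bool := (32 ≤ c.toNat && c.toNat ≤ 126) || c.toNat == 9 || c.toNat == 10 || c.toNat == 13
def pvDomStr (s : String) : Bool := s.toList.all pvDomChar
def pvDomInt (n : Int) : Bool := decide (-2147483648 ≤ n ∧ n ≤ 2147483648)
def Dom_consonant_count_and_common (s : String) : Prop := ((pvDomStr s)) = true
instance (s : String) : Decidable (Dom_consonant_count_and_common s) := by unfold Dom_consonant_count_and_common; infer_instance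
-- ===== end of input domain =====

-- B replaces A's whole-string Counter + pair list + sort by a single pass keeping a running
-- total and a consonant-count dict, selecting the winner with one argmin (same tie-break).

-- ===== PORT A =====
-- literal transliteration of A: lower, Counter over the whole string, generator sum over the
-- consonant alphabet, pair list, in-place sort by (-count, letter), head or None.
def consonant_count_and_common (s : String) : Int × Option String :=
  let t := (PySem.Str.lower s).toList
  let consonants : List Char := "bcdfghjklmnpqrstvwxyz".toList
  let counter := PySem.Dict.counter t
  let consonant_count : Int :=
    ((consonants.filter (fun c => counter.contains c)).map (fun c => counter.getD c 0)).sum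
  let common_consonants :=
    (consonants.filter (fun c => counter.contains c)).map (fun c => (c, counter.getD c 0))
  let sortedC := PySem.List.sorted2 common_consonants (fun x => -x.2) (fun x => x.1)
  let most_common : Option String :=
    match sortedC with
    | [] => none
    | p :: _ => some (String.ofList [p.1])
  (consonant_count, most_common)

-- ===== PORT B =====
-- literal transliteration of B (Source B): one fold over s.lower() keeping (total, counts);
-- min over the dict's keys with key (-counts[c], c).  min2? = none is exactly Source B's
-- 'if not counts' branch (min2? is none iff the key list, i.e. the dict, is empty).
def consonant_count_and_common_alt (s : String) : Int × Option String :=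
  let consonants := PySem.Set.ofList "bcdfghjklmnpqrstvwxyz".toList
  let r := ((PySem.Str.lower s).toList).foldl
      (fun (acc : Int × PySem.Dict Char Int) ch =>
        if PySem.Set.contains consonants ch then
          (acc.1 + 1, acc.2.insert ch (acc.2.getD ch 0 + 1))
        else acc)
      (0, PySem.Dict.empty)
  match PySem.List.min2? r.2.keys (fun c => -(r.2.getD c 0)) (fun c => c) with
  | none => (r.1, none)
  | some c => (r.1, some (String.ofList [c]))

-- ===== PRECONDITION & SPEC =====
def Spec_consonant_count_and_common (s : String) (out : Int × Option String) : Prop := out = consonant_count_and_common_alt s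
instance (s : String) (out : Int × Option String) : Decidable (Spec_consonant_count_and_common s out) := by unfold Spec_consonant_count_and_common; infer_instance

-- ===== CLAIM (what is proved, stated in full; the proofs are below) =====
def Claim_equal_consonant_count_and_common : Prop := ∀ (s : String), Dom_consonant_count_and_common s → Spec_consonant_count_and_common s (consonant_count_and_common s)

-- ===== LEMMAS AND PROOFS =====

-- the strict 'better' test used by both min2? and sorted2 for the key (k1 x, k2 x)
def pvLtB {α : Type} (k1 : α → Int) (k2 : α → Char) (x m : α) : Bool :=
  decide (k1 x < k1 m) || (!decide (k1 m < k1 x) && decide (k2 x < k2 m))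

-- its complement, as a Prop: (k1 m, k2 m) ≤lex (k1 y, k2 y)
def pvLe {α : Type} (k1 : α → Int) (k2 : α → Char) (m y : α) : Prop :=
  k1 m < k1 y ∨ (k1 m = k1 y ∧ k2 m ≤ k2 y)

def pvMin {α : Type} (k1 : α → Int) (k2 : α → Char) (a : α) (xs : List α) : α :=
  xs.foldl (fun a x => if pvLtB k1 k2 x a then x else a) a

theorem pvLtB_false_iff {α : Type} (k1 : α → Int) (k2 : α → Char) (x m : α) :
    pvLtB k1 k2 x m = false ↔ pvLe k1 k2 m x := by
  simp only [pvLtB, pvLe, Bool.or_eq_false_iff, Bool.and_eq_false_iff, Bool.not_eq_false',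
    decide_eq_false_iff_not, decide_eq_true_eq, not_lt]
  constructor
  · rintro ⟨h1, h2 | h2⟩
    · exact Or.inl h2
    · rcases lt_or_eq_of_le h1 with h | h
      · exact Or.inl h
      · exact Or.inr ⟨h, h2⟩
  · rintro (h | ⟨h1, h2⟩)
    · exact ⟨le_of_lt h, Or.inl h⟩
    · exact ⟨le_of_eq h1, Or.inr (le_of_le_of_eq h2 rfl)⟩

theorem pvLe_refl {α : Type} (k1 : α → Int) (k2 : α → Char) (a : α) : pvLe k1 k2 a a :=
  Or.inr ⟨rfl, le_refl _⟩

theorem pvLe_trans {α : Type} (k1 : α → Int) (k2 : α → Char) {a b c : α}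
    (h1 : pvLe k1 k2 a b) (h2 : pvLe k1 k2 b c) : pvLe k1 k2 a c := by
  rcases h1 with h1 | ⟨h1, h1'⟩ <;> rcases h2 with h2 | ⟨h2, h2'⟩
  · exact Or.inl (lt_trans h1 h2)
  · exact Or.inl (h2 ▸ h1)
  · exact Or.inl (h1 ▸ h2)
  · exact Or.inr ⟨h1.trans h2, le_trans h1' h2'⟩

-- the running-min loop: membership and minimality
theorem pvMin_cons {α : Type} (k1 : α → Int) (k2 : α → Char) (a x : α) (r : List α) :
    pvMin k1 k2 a (x :: r) = pvMin k1 k2 (if pvLtB k1 k2 x a then x else a) r := rfl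

theorem pvLtB_true_le {α : Type} (k1 : α → Int) (k2 : α → Char) {x a : α}
    (h : pvLtB k1 k2 x a = true) : pvLe k1 k2 x a := by
  simp only [pvLtB, Bool.or_eq_true, Bool.and_eq_true, Bool.not_eq_true',
    decide_eq_true_eq, decide_eq_false_iff_not, not_lt] at h
  rcases h with h | ⟨h1, h2⟩
  · exact Or.inl h
  · rcases lt_or_eq_of_le h1 with h' | h'
    · exact Or.inl h'
    · exact Or.inr ⟨h', le_of_lt h2⟩

theorem pvMin_spec {α : Type} (k1 : α → Int) (k2 : α → Char) :
    ∀ (xs : List α) (a : α),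
      (pvMin k1 k2 a xs = a ∨ pvMin k1 k2 a xs ∈ xs) ∧
      pvLe k1 k2 (pvMin k1 k2 a xs) a ∧
      ∀ y ∈ xs, pvLe k1 k2 (pvMin k1 k2 a xs) y := by
  intro xs
  induction xs with
  | nil => intro a; exact ⟨Or.inl rfl, pvLe_refl _ _ _, by simp⟩
  | cons x r ih =>
    intro a
    rw [pvMin_cons]
    by_cases hx : pvLtB k1 k2 x a = true
    · rw [if_pos hx]
      obtain ⟨hm, hma, hall⟩ := ih x
      have hxa : pvLe k1 k2 x a := pvLtB_true_le k1 k2 hx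
      refine ⟨?_, pvLe_trans k1 k2 hma hxa, ?_⟩
      · rcases hm with h | h
        · exact Or.inr (by rw [h]; exact List.mem_cons_self)
        · exact Or.inr (List.mem_cons_of_mem _ h)
      · intro y hy
        rcases List.mem_cons.mp hy with h | h
        · exact h ▸ hma
        · exact hall y h
    · rw [Bool.not_eq_true] at hx
      rw [if_neg (by simp [hx])]
      obtain ⟨hm, hma, hall⟩ := ih a
      have hax : pvLe k1 k2 a x := (pvLtB_false_iff k1 k2 x a).mp hx
      refine ⟨?_, hma, ?_⟩
      · rcases hm with h | h
        · exact Or.inl h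
        · exact Or.inr (List.mem_cons_of_mem _ h)
      · intro y hy
        rcases List.mem_cons.mp hy with h | h
        · exact h ▸ pvLe_trans k1 k2 hma hax
        · exact hall y h

-- min2? is the running-min loop
theorem min2_fold_eq {α : Type} (k1 : α → Int) (k2 : α → Char) :
    ∀ (xs : List α) (a : α),
      xs.foldl
        (fun acc x =>
          match acc with
          | none => some x
          | some m => if (decide (k1 x < k1 m) || !decide (k1 m < k1 x) && decide (k2 x < k2 m)) = true
                      then some x else some m)
        (some a) = some (pvMin k1 k2 a xs) := by
  intro xs
  induction xs with
  | nil => intro a; rfl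
  | cons x r ih =>
    intro a
    simp only [List.foldl_cons, pvMin]
    by_cases h : pvLtB k1 k2 x a = true
    · have h' := h; simp only [pvLtB] at h'
      simp only [h', if_true, ih x, pvMin, h]
    · rw [Bool.not_eq_true] at h
      have h' := h; simp only [pvLtB] at h'
      simp only [h', Bool.false_eq_true, if_false, ih a, pvMin, h]

theorem min2_cons {α : Type} (k1 : α → Int) (k2 : α → Char) (x : α) (r : List α) :
    PySem.List.min2? (x :: r) k1 k2 = some (pvMin k1 k2 x r) := by
  simp only [PySem.List.min2?, List.foldl_cons]
  exact min2_fold_eq k1 k2 r x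

-- head of sorted2 = min2?
theorem head_insertBy {α : Type} (bf : α → α → Bool) (x : α) (l : List α) :
    (PySem.List.insertBy bf x l).head? =
      some (match l.head? with
            | none => x
            | some y => if bf x y then x else y) := by
  cases l with
  | nil => rfl
  | cons y ys =>
    simp only [PySem.List.insertBy, List.head?_cons]
    split <;> simp_all

theorem head_sorted2_eq_min2 {α : Type} (k1 : α → Int) (k2 : α → Char) (xs : List α) :
    (PySem.List.sorted2 xs k1 k2 false).head? = PySem.List.min2? xs k1 k2 := by
  simp only [PySem.List.sorted2, PySem.List.min2?, if_neg (by simp : ¬ (false = true))]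
  suffices h : ∀ (l : List α) (acc : List α),
      (l.foldl (fun acc x => PySem.List.insertBy
          (fun a b => decide (k1 a < k1 b) || !decide (k1 b < k1 a) && decide (k2 a < k2 b)) x acc) acc).head? =
      l.foldl (fun acc x =>
          match acc with
          | none => some x
          | some m => if (decide (k1 x < k1 m) || !decide (k1 m < k1 x) && decide (k2 x < k2 m)) = true
                      then some x else some m) acc.head? by
    exact h xs []
  intro l
  induction l with
  | nil => intro acc; rfl
  | cons x r ih =>
    intro acc
    simp only [List.foldl_cons, ih, head_insertBy]
    cases acc with
    | nil => simp
    | cons y ys =>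
      simp only [List.head?_cons]
      congr 1
      split <;> rfl

-- ---- counting lemmas ----

-- dropping the 'if c in counter' filter does not change the sum (absent letters count 0)
theorem sum_filter_contains (t : List Char) :
    ∀ (cs : List Char),
      ((cs.filter (fun c => t.contains c)).map (fun c => (t.count c : Int))).sum =
      ((cs.map (fun c => (t.count c : Int))).sum) := by
  intro cs
  induction cs with
  | nil => rfl
  | cons c r ih =>
    rw [List.filter_cons]
    cases h : t.contains c with
    | true =>
      rw [if_pos rfl]
      simp only [List.map_cons, List.sum_cons]
      rw [ih]
    | false =>
      have h0 : t.count c = 0 := by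
        rw [List.count_eq_zero]
        simpa using h
      rw [if_neg (by simp)]
      simp only [List.map_cons, List.sum_cons]
      rw [ih, h0]
      norm_num

theorem countP_cons_head (c : Char) (cs : List Char) (hc : c ∉ cs) :
    ∀ (t : List Char),
      t.countP (fun x => (c :: cs).contains x) = t.count c + t.countP (fun x => cs.contains x) := by
  intro t
  induction t with
  | nil => rfl
  | cons x r ih =>
    simp only [List.countP_cons, List.count_cons, ih]
    by_cases hx : x = c
    · subst hx
      have : cs.contains x = false := by simpa using hc
      simp [this, hc]
      omega
    · simp only [List.contains_cons]
      have : (x == c) = false := by simpa using hx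
      simp [this]
      omega

theorem sum_count_eq_countP :
    ∀ (cs : List Char), cs.Nodup →
      ∀ (t : List Char),
        (cs.map (fun c => (t.count c : Int))).sum = (t.countP (fun x => cs.contains x) : Int) := by
  intro cs
  induction cs with
  | nil => intro _ t; simp
  | cons c r ih =>
    intro hnd t
    obtain ⟨hc, hnd'⟩ := List.nodup_cons.mp hnd
    rw [List.map_cons, List.sum_cons, ih hnd' t, countP_cons_head c r hc t]
    push_cast
    ring

-- ---- the fixed consonant alphabet ----

theorem cons_nodup : ("bcdfghjklmnpqrstvwxyz".toList).Nodup := by decide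

theorem cons_ofList : PySem.Set.ofList ("bcdfghjklmnpqrstvwxyz".toList) = "bcdfghjklmnpqrstvwxyz".toList := by decide

-- la = [] (no consonant of the alphabet occurs in t) iff the filtered string is empty
theorem la_nil_iff (cs t : List Char) :
    (cs.filter (fun c => t.contains c)) = [] ↔ (t.filter (fun c => cs.contains c)) = [] := by
  simp only [List.filter_eq_nil_iff, List.contains_eq_mem, decide_eq_true_eq]
  constructor
  · intro h a ha hb
    exact h a hb ha
  · intro h a ha hb
    exact h a hb ha

-- B's one-pass fold computes (countP, Counter of the filtered string)
theorem alt_fold (t : List Char) :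
    t.foldl (fun (acc : Int × PySem.Dict Char Int) ch =>
        if PySem.Set.contains (PySem.Set.ofList "bcdfghjklmnpqrstvwxyz".toList) ch then
          (acc.1 + 1, acc.2.insert ch (acc.2.getD ch 0 + 1))
        else acc) (0, PySem.Dict.empty)
    = ((t.countP (fun ch => ("bcdfghjklmnpqrstvwxyz".toList).contains ch) : Int),
       PySem.Dict.counter (t.filter (fun ch => ("bcdfghjklmnpqrstvwxyz".toList).contains ch))) := by
  have hfun : (fun (acc : Int × PySem.Dict Char Int) ch =>
      if PySem.Set.contains (PySem.Set.ofList "bcdfghjklmnpqrstvwxyz".toList) ch then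
        (acc.1 + 1, acc.2.insert ch (acc.2.getD ch 0 + 1))
      else acc)
    = (fun (acc : Int × PySem.Dict Char Int) ch =>
        ((fun (a : Int) ch => if ("bcdfghjklmnpqrstvwxyz".toList).contains ch then a + 1 else a) acc.1 ch,
         (fun (d : PySem.Dict Char Int) ch => if ("bcdfghjklmnpqrstvwxyz".toList).contains ch then d.insert ch (d.getD ch 0 + 1) else d) acc.2 ch)) := by
    funext acc ch
    simp only [cons_ofList, PySem.Set.contains]
    split <;> rfl
  have h2 := PySem.List.foldl_prod_mk
    (f := fun (a : Int) ch => if ("bcdfghjklmnpqrstvwxyz".toList).contains ch then a + 1 else a)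
    (g := fun (d : PySem.Dict Char Int) ch => if ("bcdfghjklmnpqrstvwxyz".toList).contains ch then d.insert ch (d.getD ch 0 + 1) else d)
    (l := t) (a := 0) (b := PySem.Dict.empty)
  rw [hfun, h2]
  rw [PySem.List.foldl_if_add_one, zero_add]
  rw [PySem.List.foldl_if_eq_foldl_filter, PySem.Dict.foldl_insert_getD_add_one_eq_counter]

-- ===== VERDICT (by name: the statement is the Claim_ definition above) =====
theorem consonant_count_and_common_spec : Claim_equal_consonant_count_and_common := by
  intro s _
  unfold Spec_consonant_count_and_common
  unfold consonant_count_and_common consonant_count_and_common_alt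
  simp only [alt_fold, PySem.Dict.contains_counter, PySem.Dict.getD_counter,
    PySem.Dict.keys_counter]
  set t := (PySem.Str.lower s).toList with ht
  set cs : List Char := "bcdfghjklmnpqrstvwxyz".toList with hcs
  set la := cs.filter (fun c => t.contains c) with hla
  set ft := t.filter (fun ch => cs.contains ch) with hft
  -- the counts agree
  have hcount : ((la.map (fun c => ((t.count c : Int)))).sum)
      = (t.countP (fun ch => cs.contains ch) : Int) := by
    rw [hla, sum_filter_contains, sum_count_eq_countP cs cons_nodup]
  -- count of a consonant in ft = count in t
  have hftc : ∀ c : Char, cs.contains c → ft.count c = t.count c := by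
    intro c hc
    rw [hft]
    exact List.count_filter hc
  -- membership in la ↔ membership in the key set
  have hmem : ∀ c : Char, c ∈ la ↔ c ∈ PySem.Set.ofList ft := by
    intro c
    rw [PySem.Set.mem_ofList, hla, hft, List.mem_filter, List.mem_filter]
    simp only [List.contains_eq_mem, decide_eq_true_eq]
    constructor
    · rintro ⟨h1, h2⟩; exact ⟨h2, by simpa using h1⟩
    · rintro ⟨h1, h2⟩; exact ⟨by simpa using h2, by simpa using h1⟩
  by_cases hnil : la = []
  · -- no consonant present: both return none
    have hftnil : ft = [] := by
      rw [hft, ← la_nil_iff cs t, ← hla]; exact hnil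
    have hz : ((t.countP (fun ch => cs.contains ch) : Nat) : Int) = (0 : Int) := by
      rw [← hcount, hnil]; simp
    rw [hnil, hftnil, hz]
    rfl
  · -- some consonant present: both return the unique (max count, alphabetically first) one
    obtain ⟨c0, laR, hla0⟩ := List.exists_cons_of_ne_nil hnil
    -- the key set is nonempty
    obtain ⟨k0, kR, hK0⟩ : ∃ k0 kR, PySem.Set.ofList ft = k0 :: kR := by
      have : c0 ∈ PySem.Set.ofList ft := (hmem c0).mp (by rw [hla0]; exact List.mem_cons_self)
      cases hK : PySem.Set.ofList ft with
      | nil => rw [hK] at this; simp at this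
      | cons a b => exact ⟨a, b, rfl⟩
    -- B's winner
    rw [hK0, min2_cons]
    set cB := pvMin (fun c => -((PySem.Dict.counter ft).getD c 0)) (fun c => c) k0 kR with hcB
    obtain ⟨hcBmem, hcBle0, hcBle⟩ := pvMin_spec (fun c => -((PySem.Dict.counter ft).getD c 0)) (fun c => c) kR k0
    rw [← hcB] at hcBmem hcBle0 hcBle
    have hcBleAll : ∀ y ∈ PySem.Set.ofList ft,
        pvLe (fun c => -((PySem.Dict.counter ft).getD c 0)) (fun c => c) cB y := by
      intro y hy
      rw [hK0] at hy
      rcases List.mem_cons.mp hy with h | h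
      · exact h ▸ hcBle0
      · exact hcBle y h
    have hcBin : cB ∈ PySem.Set.ofList ft := by
      rw [hK0]
      rcases hcBmem with h | h
      · exact h ▸ List.mem_cons_self
      · exact List.mem_cons_of_mem _ h
    -- A's winner
    rw [hla0]
    simp only [List.map_cons]
    obtain ⟨pA, tl, hS⟩ : ∃ pA tl, PySem.List.sorted2 ((c0, (t.count c0 : Int)) :: laR.map (fun c => (c, (t.count c : Int)))) (fun x => -x.2) (fun x => x.1) false = pA :: tl := by
      have hh := head_sorted2_eq_min2 (fun x : Char × Int => -x.2) (fun x : Char × Int => x.1)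
        ((c0, (t.count c0 : Int)) :: laR.map (fun c => (c, (t.count c : Int))))
      rw [min2_cons] at hh
      cases hE : PySem.List.sorted2 ((c0, (t.count c0 : Int)) :: laR.map (fun c => (c, (t.count c : Int)))) (fun x => -x.2) (fun x => x.1) false with
      | nil => rw [hE] at hh; exact absurd hh (by simp)
      | cons a b => exact ⟨a, b, rfl⟩
    rw [hS]
    -- characterize pA
    have hh := head_sorted2_eq_min2 (fun x : Char × Int => -x.2) (fun x : Char × Int => x.1)
      ((c0, (t.count c0 : Int)) :: laR.map (fun c => (c, (t.count c : Int))))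
    rw [min2_cons, hS, List.head?_cons] at hh
    have hpA : pA = pvMin (fun x : Char × Int => -x.2) (fun x : Char × Int => x.1) (c0, (t.count c0 : Int)) (laR.map (fun c => (c, (t.count c : Int)))) :=
      Option.some.inj hh
    obtain ⟨hpAmem, hpAle0, hpAle⟩ := pvMin_spec (fun x : Char × Int => -x.2) (fun x : Char × Int => x.1)
      (laR.map (fun c => (c, (t.count c : Int)))) (c0, (t.count c0 : Int))
    rw [← hpA] at hpAmem hpAle0 hpAle
    have hpAin : pA ∈ la.map (fun c => (c, (t.count c : Int))) := by
      rw [hla0, List.map_cons]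
      rcases hpAmem with h | h
      · exact h ▸ List.mem_cons_self
      · exact List.mem_cons_of_mem _ h
    have hpAleAll : ∀ q ∈ la.map (fun c => (c, (t.count c : Int))),
        pvLe (fun x : Char × Int => -x.2) (fun x : Char × Int => x.1) pA q := by
      intro q hq
      rw [hla0, List.map_cons] at hq
      rcases List.mem_cons.mp hq with h | h
      · exact h ▸ hpAle0
      · exact hpAle q h
    -- pA is (cA, count cA) with cA ∈ la
    obtain ⟨cA, hcAla, hcAeq⟩ : ∃ cA, cA ∈ la ∧ pA = (cA, (t.count cA : Int)) := by
      rcases List.mem_map.mp hpAin with ⟨c, hc, he⟩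
      exact ⟨c, hc, he.symm⟩
    -- cross minimality: cA = cB
    have hcBcs : cs.contains cB := by
      have := (hmem cB).mpr hcBin
      rw [hla] at this
      have := List.mem_filter.mp this
      simpa using this.1
    have hcAcs : cs.contains cA := by
      rw [hla] at hcAla
      have := List.mem_filter.mp hcAla
      simpa using this.1
    have h1 : pvLe (fun x : Char × Int => -x.2) (fun x : Char × Int => x.1) pA (cB, (t.count cB : Int)) := by
      apply hpAleAll
      exact List.mem_map.mpr ⟨cB, (hmem cB).mpr hcBin, rfl⟩
    have h2 : pvLe (fun c => -((PySem.Dict.counter ft).getD c 0)) (fun c => c) cB cA := by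
      apply hcBleAll
      exact (hmem cA).mp hcAla
    have hAB : cA = cB := by
      rw [hcAeq] at h1
      simp only [pvLe, PySem.Dict.getD_counter, hftc cB hcBcs, hftc cA hcAcs] at h1 h2
      rcases h1 with h1 | ⟨h1, h1'⟩ <;> rcases h2 with h2 | ⟨h2, h2'⟩
      · omega
      · omega
      · omega
      · exact le_antisymm h1' h2'
    rw [Prod.mk.injEq]
    constructor
    · rw [← hcount, hla0]
      simp only [List.map_cons]
    · have hcB' : cB = pvMin (fun c => -((List.count c ft : Nat) : Int)) (fun c => c) k0 kR := by
        rw [hcB]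
        simp only [PySem.Dict.getD_counter]
      simp only [hcAeq]
      rw [hAB, hcB']
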